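-- pv_equiv track=rewrite | github.com/jconorgrogan/Stern-Brocot-Tree-exploration | LinesandCircles.py | sb_tree
-- ===== SOURCE A (Python) =====
-- from typing import List, Tuple
--
-- def sb_tree(rn: List[Tuple[int, int]], n: int) -> List[Tuple[int, int]]:
--     if not n:
--         return rn
--     def new_rn():
--         for i in range(len(rn) - 1):
--             yield from (rn[i], tuple(map(sum, zip(rn[i], rn[i+1]))))
--         yield rn[i+1]
--     return sb_tree(list(new_rn()), n-1)
-- ===== SOURCE B (Python) =====
-- def sb_tree(rn, n):
--     for _ in range(n):
--         nxt = [rn[0]]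
--         for (a, b), (c, d) in zip(rn, rn[1:]):
--             nxt.append((a + c, b + d))
--             nxt.append((c, d))
--         rn = nxt
--     return rn
-- ===== Notes on version B (the rewrite author's own statement) =====
-- stated objective: simpler
-- what changed: Replaces the tail recursion plus index-based generator with a plain iterative loop that rebuilds the row n times by folding over adjacent pairs (zip of the row with its tail), appending each mediant and right neighbour after seeding with the head.
import Mathlib
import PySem

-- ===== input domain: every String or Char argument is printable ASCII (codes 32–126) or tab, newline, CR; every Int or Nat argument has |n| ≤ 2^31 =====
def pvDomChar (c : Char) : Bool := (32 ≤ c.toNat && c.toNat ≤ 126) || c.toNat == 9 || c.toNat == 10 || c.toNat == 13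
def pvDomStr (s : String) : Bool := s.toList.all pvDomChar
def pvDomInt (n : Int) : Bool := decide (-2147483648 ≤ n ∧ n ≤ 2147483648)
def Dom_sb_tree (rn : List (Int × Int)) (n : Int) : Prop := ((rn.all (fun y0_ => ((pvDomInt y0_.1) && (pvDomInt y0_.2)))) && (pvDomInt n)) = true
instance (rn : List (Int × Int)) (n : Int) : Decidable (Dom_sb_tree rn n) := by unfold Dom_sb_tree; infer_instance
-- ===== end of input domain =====

-- B replaces A's tail recursion + index generator by an iterative loop folding over adjacent
-- pairs (zip with the tail); objective: simpler. Equivalence on Pre_ (n ≥ 0 and, for n ≥ 1,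
-- rows of length ≥ 2 — elsewhere A raises).

-- ===== PORT A =====
-- A's generator new_rn: for i in range(len(rn)-1): yield rn[i], rn[i]+rn[i+1]; then yield rn[i+1]
-- (leftover i = len(rn)-2). Indexing via getD: inside Pre_ every index is in range.
def sbA_new (rn : List (Int × Int)) : List (Int × Int) :=
  ((List.range (rn.length - 1)).foldl
    (fun acc i =>
      acc ++ [rn.getD i (0, 0),
              ((rn.getD i (0, 0)).1 + (rn.getD (i + 1) (0, 0)).1,
               (rn.getD i (0, 0)).2 + (rn.getD (i + 1) (0, 0)).2)])
    []) ++ [rn.getD (rn.length - 2 + 1) (0, 0)]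
-- A's recursion 'if not n: return rn; return sb_tree(list(new_rn()), n-1)', counted down on
-- the fuel n.toNat (faithful for n ≥ 0, which Pre_ guarantees; Python diverges for n < 0).
def sbA : List (Int × Int) → Nat → List (Int × Int)
  | rn, 0 => rn
  | rn, m + 1 => sbA (sbA_new rn) m

def sb_tree (rn : List (Int × Int)) (n : Int) : List (Int × Int) := sbA rn n.toNat

-- ===== PORT B =====
-- one body-rebuilding step: nxt = [rn[0]]; for (a,b),(c,d) in zip(rn, rn[1:]): append mediant, append (c,d)
def sbB_step (rn : List (Int × Int)) : List (Int × Int) :=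
  (rn.zip rn.tail).foldl
    (fun nxt pq => nxt ++ [(pq.1.1 + pq.2.1, pq.1.2 + pq.2.2), pq.2])
    [rn.getD 0 (0, 0)]

def sb_tree_alt (rn : List (Int × Int)) (n : Int) : List (Int × Int) :=
  (List.range n.toNat).foldl (fun r _ => sbB_step r) rn

-- ===== PRECONDITION & SPEC =====
-- Pre_ excludes exactly the inputs where A raises: n < 0 (unbounded recursion, RecursionError)
-- and n ≥ 1 with fewer than 2 rows (UnboundLocalError in the generator).
def Pre_sb_tree (rn : List (Int × Int)) (n : Int) : Prop := 0 ≤ n ∧ (n = 0 ∨ 2 ≤ rn.length)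
instance (rn : List (Int × Int)) (n : Int) : Decidable (Pre_sb_tree rn n) := by
  unfold Pre_sb_tree; infer_instance
def pvWitness_sb_tree : (List (Int × Int)) × Int := ([(0, 1), (1, 0)], 3)

def Spec_sb_tree (rn : List (Int × Int)) (n : Int) (out : List (Int × Int)) : Prop := out = sb_tree_alt rn n
instance (rn : List (Int × Int)) (n : Int) (out : List (Int × Int)) : Decidable (Spec_sb_tree rn n out) := by unfold Spec_sb_tree; infer_instance

-- ===== CLAIM (what is proved, stated in full; the proofs are below) =====
def Claim_equal_sb_tree : Prop := ∀ (rn : List (Int × Int)) (n : Int), Dom_sb_tree rn n → Pre_sb_tree rn n → Spec_sb_tree rn n (sb_tree rn n)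

-- ===== LEMMAS AND PROOFS =====

-- common characterisation of one row-building step
def ins : List (Int × Int) → List (Int × Int)
  | [] => []
  | [a] => [a]
  | a :: b :: t => a :: (a.1 + b.1, a.2 + b.2) :: ins (b :: t)

lemma ins_length (rn : List (Int × Int)) (h : 2 ≤ rn.length) : 2 ≤ (ins rn).length := by
  match rn with
  | a :: b :: t => simp [ins]

-- B's fold equals ins on nonempty rows
lemma sbB_cons (a : Int × Int) (t : List (Int × Int)) :
    sbB_step (a :: t) = ins (a :: t) := by
  suffices h : ∀ (t : List (Int × Int)) (a : Int × Int) (acc : List (Int × Int)),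
      ((a :: t).zip t).foldl
        (fun nxt pq => nxt ++ [(pq.1.1 + pq.2.1, pq.1.2 + pq.2.2), pq.2]) (acc ++ [a])
      = acc ++ ins (a :: t) by
    simpa [sbB_step] using h t a []
  intro t
  induction t with
  | nil => intro a acc; simp [ins]
  | cons b t ih =>
      intro a acc
      simp only [List.zip_cons_cons, List.foldl_cons, ins]
      have := ih b (acc ++ [a, (a.1 + b.1, a.2 + b.2)])
      simpa using this

-- A's generator equals ins on rows of length ≥ 2
lemma sbA_new_eq_ins (rn : List (Int × Int)) (h : 2 ≤ rn.length) :
    sbA_new rn = ins rn := by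
  have key : ∀ (rn : List (Int × Int)), 1 ≤ rn.length →
      (List.range (rn.length - 1)).flatMap
        (fun i => [rn.getD i (0, 0),
                   ((rn.getD i (0, 0)).1 + (rn.getD (i + 1) (0, 0)).1,
                    (rn.getD i (0, 0)).2 + (rn.getD (i + 1) (0, 0)).2)])
        ++ [rn.getD (rn.length - 1) (0, 0)] = ins rn := by
    intro rn
    induction rn with
    | nil => simp
    | cons a t ih =>
        intro _
        match t, ih with
        | [], _ => simp [ins]
        | b :: t', ih =>
            have h1 : (a :: b :: t').length - 1 = (b :: t').length - 1 + 1 := by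
              simp
            rw [h1, List.range_succ_eq_map]
            have ih' := ih (by simp)
            simp only [List.flatMap_cons, List.flatMap_map] at *
            simp only [ins]
            simp only [List.getD_cons_succ, List.getD_cons_zero] at *
            simpa [List.append_assoc] using ih'
  have hidx : rn.length - 2 + 1 = rn.length - 1 := by omega
  have := key rn (by omega)
  simpa [sbA_new, hidx, PySem.List.foldl_append_eq_flatMap] using this

lemma step_eq (rn : List (Int × Int)) (h : 2 ≤ rn.length) : sbA_new rn = sbB_step rn := by
  match rn, h with
  | a :: t, h => rw [sbA_new_eq_ins _ h, sbB_cons]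

lemma sbA_eq_alt (rn : List (Int × Int)) (m : Nat) (h : 2 ≤ rn.length) :
    sbA rn m = (List.range m).foldl (fun r _ => sbB_step r) rn := by
  induction m generalizing rn with
  | zero => rfl
  | succ m ih =>
      have h2 : 2 ≤ (sbA_new rn).length := by
        rw [sbA_new_eq_ins rn h]; exact ins_length rn h
      calc sbA rn (m + 1) = sbA (sbA_new rn) m := rfl
        _ = (List.range m).foldl (fun r _ => sbB_step r) (sbA_new rn) := ih _ h2
        _ = (List.range m).foldl (fun r _ => sbB_step r) (sbB_step rn) := by
              rw [step_eq rn h]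
        _ = (List.range (m + 1)).foldl (fun r _ => sbB_step r) rn := by
              rw [List.range_succ_eq_map]
              simp [List.foldl_map]

-- ===== VERDICT (by name: the statement is the Claim_ definition above) =====
theorem sb_tree_spec : Claim_equal_sb_tree := by
  intro rn n _ hpre
  unfold Spec_sb_tree sb_tree sb_tree_alt
  rcases hpre with ⟨hn, h0 | h2⟩
  · subst h0; rfl
  · exact sbA_eq_alt rn n.toNat h2
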